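-- pv_equiv track=rewrite | github.com/simonescaccia/UnPIE | dataset/psi_data.py | split_frame_lists
-- ===== SOURCE A (Python) =====
-- def split_frame_lists(frame_list, bbox_list, threshold=60):
--     # For a sequence of an observed pedestrian, split into slices based on missingframes
--     frame_res = []
--     bbox_res = []
--     inds_res = []
--
--     inds_split = [0]
--     frame_split = [frame_list[0]]  # frame list
--     bbox_split = [bbox_list[0]]  # bbox list
--     for i in range(1, len(frame_list)):
--         if frame_list[i] - frame_list[i - 1] == 1: # consistent
--             inds_split.append(i)
--             frame_split.append(frame_list[i])
--             bbox_split.append(bbox_list[i])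
--         else:  # # next position frame is missing observed
--             if len(frame_split) > threshold:  # only take the slices longer than threshold=max_track_length=60
--                 inds_res.append(inds_split)
--                 frame_res.append(frame_split)
--                 bbox_res.append(bbox_split)
--                 inds_split = []
--                 frame_split = []
--                 bbox_split = []
--             else:  # ignore splits that are too short
--                 inds_split = []
--                 frame_split = []
--                 bbox_split = []
--     # break loop when i reaches the end of list
--     if len(frame_split) > threshold:  # reach the end
--         inds_res.append(inds_split)
--         frame_res.append(frame_split)
--         bbox_res.append(bbox_split)
--
--     return frame_res, bbox_res, inds_res
-- ===== SOURCE B (Python) =====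
-- def split_frame_lists(frame_list, bbox_list, threshold=60):
--     # Boundary-based re-implementation: collect gap boundaries, then slice.
--     n = len(frame_list)
--     bounds = [i for i in range(1, n) if frame_list[i] - frame_list[i - 1] != 1]
--     bounds.append(n)
--     frame_res, bbox_res, inds_res = [], [], []
--     prev = 0
--     for bd in bounds:
--         if bd - prev > threshold:
--             inds_res.append(list(range(prev, bd)))
--             frame_res.append(frame_list[prev:bd])
--             bbox_res.append(bbox_list[prev:bd])
--         prev = bd + 1
--     return frame_res, bbox_res, inds_res
-- ===== Notes on version B (the rewrite author's own statement) =====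
-- stated objective: alternative
-- what changed: A's single pass with six running accumulators is replaced by a two-pass decomposition: first collect the gap boundary indices, then emit each boundary-delimited block by slicing when its length exceeds the threshold.
import Mathlib
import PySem

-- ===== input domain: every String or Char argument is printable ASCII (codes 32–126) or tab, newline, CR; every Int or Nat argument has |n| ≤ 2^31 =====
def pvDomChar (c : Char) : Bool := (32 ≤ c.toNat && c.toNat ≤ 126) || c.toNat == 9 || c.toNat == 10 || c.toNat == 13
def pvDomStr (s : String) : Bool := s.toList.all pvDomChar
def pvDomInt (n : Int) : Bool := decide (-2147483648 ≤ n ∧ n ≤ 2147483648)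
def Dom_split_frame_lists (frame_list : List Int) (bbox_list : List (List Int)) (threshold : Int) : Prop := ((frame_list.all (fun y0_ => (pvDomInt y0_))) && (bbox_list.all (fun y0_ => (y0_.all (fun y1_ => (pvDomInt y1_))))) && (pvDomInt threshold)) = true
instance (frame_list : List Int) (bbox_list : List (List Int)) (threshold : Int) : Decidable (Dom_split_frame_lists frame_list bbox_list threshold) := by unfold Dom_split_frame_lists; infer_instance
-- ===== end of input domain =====

-- B replaces A's single-pass accumulator loop by a two-pass decomposition (gap-boundary list, then slicing); objective: alternative.


-- ===== PORT A =====
-- loop body of A's `for i in range(1, len(frame_list))`; indices are Nats from range(1,n),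
-- so `frame_list[i]` is `getD i 0` (defaults never fire inside Pre_, where every access is in range)
def pvStepA (f : List Int) (b : List (List Int)) (t : Int)
    (st : List (List Int) × List (List (List Int)) × List (List Int) × List Int × List Int × List (List Int))
    (i : Nat) : List (List Int) × List (List (List Int)) × List (List Int) × List Int × List Int × List (List Int) :=
  match st with
  | (fr, br, ir, is_, fs, bs) =>
    if f.getD i 0 - f.getD (i - 1) 0 = 1 then
      (fr, br, ir, is_ ++ [(i : Int)], fs ++ [f.getD i 0], bs ++ [b.getD i []])
    else if t < (fs.length : Int) then
      (fr ++ [fs], br ++ [bs], ir ++ [is_], [], [], [])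
    else
      (fr, br, ir, [], [], [])

def split_frame_lists (frame_list : List Int) (bbox_list : List (List Int)) (threshold : Int) : List (List Int) × List (List (List Int)) × List (List Int) :=
  match (List.range' 1 (frame_list.length - 1)).foldl (pvStepA frame_list bbox_list threshold)
      ([], [], [], [(0 : Int)], [frame_list.getD 0 0], [bbox_list.getD 0 []]) with
  | (fr, br, ir, is_, fs, bs) =>
    if threshold < (fs.length : Int) then (fr ++ [fs], br ++ [bs], ir ++ [is_]) else (fr, br, ir)

-- ===== PORT B =====
-- xs[s:bd] for 0 ≤ s ≤ bd (Python slice with nonnegative in-order bounds = drop/take)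
def pvSlice (xs : List (α : Type)) (s e : Nat) : List α := (xs.drop s).take (e - s)

def pvStepB (f : List Int) (b : List (List Int)) (t : Int)
    (acc : (List (List Int) × List (List (List Int)) × List (List Int)) × Nat)
    (bd : Nat) : (List (List Int) × List (List (List Int)) × List (List Int)) × Nat :=
  match acc with
  | ((fr, br, ir), prev) =>
    if t < (bd : Int) - (prev : Int) then
      ((fr ++ [pvSlice f prev bd], br ++ [pvSlice b prev bd],
        ir ++ [(List.range' prev (bd - prev)).map (fun j => (j : Int))]), bd + 1)
    else ((fr, br, ir), bd + 1)

def split_frame_lists_alt (frame_list : List Int) (bbox_list : List (List Int)) (threshold : Int) : List (List Int) × List (List (List Int)) × List (List Int) :=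
  let bounds := ((List.range' 1 (frame_list.length - 1)).filter
      (fun i => frame_list.getD i 0 - frame_list.getD (i - 1) 0 ≠ 1)) ++ [frame_list.length]
  (bounds.foldl (pvStepB frame_list bbox_list threshold) (([], [], []), 0)).1

-- ===== PRECONDITION & SPEC =====
-- Pre_ excludes exactly the inputs where A raises IndexError: empty frame_list (frame_list[0])
-- and inputs where some index A reads in bbox_list (index 0 or a consecutive-frame index) is out of range.
def Pre_split_frame_lists (frame_list : List Int) (bbox_list : List (List Int)) (threshold : Int) : Prop :=
  frame_list ≠ [] ∧
  ∀ i, i < frame_list.length →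
    (i = 0 ∨ frame_list.getD i 0 - frame_list.getD (i - 1) 0 = 1) → i < bbox_list.length
instance (frame_list : List Int) (bbox_list : List (List Int)) (threshold : Int) : Decidable (Pre_split_frame_lists frame_list bbox_list threshold) := by unfold Pre_split_frame_lists; infer_instance

def pvWitness_split_frame_lists : List Int × List (List Int) × Int := ([1, 2, 3, 7], [[0], [1], [2], [3]], 2)

def Spec_split_frame_lists (frame_list : List Int) (bbox_list : List (List Int)) (threshold : Int) (out : List (List Int) × List (List (List Int)) × List (List Int)) : Prop := out = split_frame_lists_alt frame_list bbox_list threshold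
instance (frame_list : List Int) (bbox_list : List (List Int)) (threshold : Int) (out : List (List Int) × List (List (List Int)) × List (List Int)) : Decidable (Spec_split_frame_lists frame_list bbox_list threshold out) := by unfold Spec_split_frame_lists; infer_instance

-- ===== CLAIM (what is proved, stated in full; the proofs are below) =====
def Claim_equal_split_frame_lists : Prop := ∀ (frame_list : List Int) (bbox_list : List (List Int)) (threshold : Int), Dom_split_frame_lists frame_list bbox_list threshold → Pre_split_frame_lists frame_list bbox_list threshold → Spec_split_frame_lists frame_list bbox_list threshold (split_frame_lists frame_list bbox_list threshold)

-- ===== LEMMAS AND PROOFS =====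

-- the three components of A's current split, when the split covers indices [s, k)
def pvSegI (s k : Nat) : List Int := (List.range' s (k - s)).map (fun j => (j : Int))

-- A's trailing flush
def pvFinish (t : Int)
    (st : List (List Int) × List (List (List Int)) × List (List Int) × List Int × List Int × List (List Int)) :
    List (List Int) × List (List (List Int)) × List (List Int) :=
  match st with
  | (fr, br, ir, is_, fs, bs) =>
    if t < (fs.length : Int) then (fr ++ [fs], br ++ [bs], ir ++ [is_]) else (fr, br, ir)

lemma pvSlice_length (xs : List (α : Type)) (s e : Nat) (h : e ≤ xs.length) (hs : s ≤ e) :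
    (pvSlice xs s e).length = e - s := by
  simp [pvSlice]; omega

lemma pvSlice_snoc (xs : List (α : Type)) (s k : Nat) (hs : s ≤ k) (hk : k < xs.length) (d : α) :
    pvSlice xs s k ++ [xs.getD k d] = pvSlice xs s (k + 1) := by
  unfold pvSlice
  have h1 : k + 1 - s = (k - s) + 1 := by omega
  rw [h1, List.take_add_one]
  have h2 : (xs.drop s)[k - s]? = xs[k]? := by
    rw [List.getElem?_drop]; congr 1; omega
  have h3 : xs[k]? = some xs[k] := List.getElem?_eq_getElem hk
  simp [h2, h3, List.getD]

lemma pvSegI_snoc (s k : Nat) (hs : s ≤ k) :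
    pvSegI s k ++ [(k : Int)] = pvSegI s (k + 1) := by
  unfold pvSegI
  have h1 : k + 1 - s = (k - s) + 1 := by omega
  rw [h1, List.range'_concat]
  have : s + (k - s) = k := by omega
  simp [this]

-- main invariant: A's loop over indices [k, n) followed by the trailing flush equals
-- B's fold over the gap boundaries in [k, n) plus the final boundary n, given that
-- the current split covers [s, k)
lemma pvMain (f : List Int) (b : List (List Int)) (t : Int)
    (hPre : ∀ i, i < f.length →
      (i = 0 ∨ f.getD i 0 - f.getD (i - 1) 0 = 1) → i < b.length) :
    ∀ m k s (fr : List (List Int)) (br : List (List (List Int))) (ir : List (List Int)),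
      k + m = f.length → s ≤ k →
      (∀ i, s ≤ i → i < k → i < b.length) →
      pvFinish t ((List.range' k m).foldl (pvStepA f b t)
          (fr, br, ir, pvSegI s k, pvSlice f s k, pvSlice b s k)) =
        ((((List.range' k m).filter (fun i => f.getD i 0 - f.getD (i - 1) 0 ≠ 1)) ++ [f.length]).foldl
          (pvStepB f b t) ((fr, br, ir), s)).1 := by
  intro m
  induction m with
  | zero =>
    intro k s fr br ir hkm hsk hb
    have hk : k = f.length := by omega
    subst hk
    have hlen : (pvSlice f s f.length).length = f.length - s :=
      pvSlice_length f s f.length le_rfl hsk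
    have hcast : ((f.length - s : Nat) : Int) = (f.length : Int) - (s : Int) := by omega
    simp only [List.range', List.filter_nil, List.nil_append, List.foldl_cons, List.foldl_nil,
      pvFinish, pvStepB, hlen, hcast, pvSegI]
    split_ifs <;> rfl
  | succ m ih =>
    intro k s fr br ir hkm hsk hb
    have hk : k < f.length := by omega
    have hrange : List.range' k (m + 1) = k :: List.range' (k + 1) m := by
      rw [List.range'_succ]
    rw [hrange]
    by_cases hc : f.getD k 0 - f.getD (k - 1) 0 = 1
    · -- index k is consecutive: A appends, B's boundary filter skips it
      have hkb : k < b.length := hPre k hk (Or.inr hc)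
      have hstep : pvStepA f b t (fr, br, ir, pvSegI s k, pvSlice f s k, pvSlice b s k) k =
          (fr, br, ir, pvSegI s (k + 1), pvSlice f s (k + 1), pvSlice b s (k + 1)) := by
        simp only [pvStepA, if_pos hc, pvSegI_snoc s k hsk, pvSlice_snoc f s k hsk hk,
          pvSlice_snoc b s k hsk hkb]
      simp only [List.foldl_cons, hstep, List.filter_cons, hc]
      simp only [ne_eq, not_true_eq_false, decide_false, Bool.false_eq_true, if_false]
      exact ih (k + 1) s fr br ir (by omega) (by omega)
        (fun i h1 h2 => by rcases Nat.lt_or_ge i k with h | h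
                           · exact hb i h1 h
                           · have : i = k := by omega
                             exact this ▸ hkb)
    · -- index k is a gap: A flushes and resets, B processes boundary k
      have hlen : (pvSlice f s k).length = k - s := pvSlice_length f s k (by omega) hsk
      have hcast : ((k - s : Nat) : Int) = (k : Int) - (s : Int) := by omega
      have hempty : ∀ (α : Type) (xs : List α), pvSlice xs (k + 1) (k + 1) = [] := by
        intro α xs; simp [pvSlice]
      have hemptyI : pvSegI (k + 1) (k + 1) = [] := by simp [pvSegI]
      simp only [List.foldl_cons, List.filter_cons]
      rw [if_pos (show (decide ¬f.getD k 0 - f.getD (k - 1) 0 = 1) = true from by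
        simpa using hc)]
      simp only [List.cons_append, List.foldl_cons]
      by_cases ht : t < (k : Int) - (s : Int)
      · have hstep : pvStepA f b t (fr, br, ir, pvSegI s k, pvSlice f s k, pvSlice b s k) k =
            (fr ++ [pvSlice f s k], br ++ [pvSlice b s k], ir ++ [pvSegI s k], [], [], []) := by
          simp only [pvStepA, if_neg hc, hlen, hcast, if_pos ht]
        have hstepB : pvStepB f b t ((fr, br, ir), s) k =
            ((fr ++ [pvSlice f s k], br ++ [pvSlice b s k], ir ++ [pvSegI s k]), k + 1) := by
          simp only [pvStepB, if_pos ht, pvSegI]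
        rw [hstep, hstepB]
        have := ih (k + 1) (k + 1) (fr ++ [pvSlice f s k]) (br ++ [pvSlice b s k])
          (ir ++ [pvSegI s k]) (by omega) le_rfl (fun i h1 h2 => by omega)
        rw [hempty Int f, hempty (List Int) b, hemptyI] at this
        exact this
      · have hstep : pvStepA f b t (fr, br, ir, pvSegI s k, pvSlice f s k, pvSlice b s k) k =
            (fr, br, ir, [], [], []) := by
          simp only [pvStepA, if_neg hc, hlen, hcast, if_neg ht]
        have hstepB : pvStepB f b t ((fr, br, ir), s) k = ((fr, br, ir), k + 1) := by
          simp only [pvStepB, if_neg ht]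
        rw [hstep, hstepB]
        have := ih (k + 1) (k + 1) fr br ir (by omega) le_rfl (fun i h1 h2 => by omega)
        rw [hempty Int f, hempty (List Int) b, hemptyI] at this
        exact this

-- ===== VERDICT (by name: the statement is the Claim_ definition above) =====
theorem split_frame_lists_spec : Claim_equal_split_frame_lists := by
  intro f b t _ hPre
  obtain ⟨hne, hb⟩ := hPre
  have hn : 1 ≤ f.length := by
    cases f with | nil => exact absurd rfl hne | cons x xs => simp
  have h0b : 0 < b.length := hb 0 (by omega) (Or.inl rfl)
  have hI : pvSegI 0 1 = [(0 : Int)] := by simp [pvSegI, List.range']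
  have hF : pvSlice f 0 1 = [f.getD 0 0] := by
    cases f with
    | nil => exact absurd rfl hne
    | cons x xs => simp [pvSlice, List.getD]
  have hB : pvSlice b 0 1 = [b.getD 0 []] := by
    cases b with
    | nil => simp at h0b
    | cons x xs => simp [pvSlice, List.getD]
  have hmain := pvMain f b t hb (f.length - 1) 1 0 [] [] [] (by omega) (by omega)
    (fun i h1 h2 => by omega)
  rw [hI, hF, hB] at hmain
  show split_frame_lists f b t = split_frame_lists_alt f b t
  unfold split_frame_lists split_frame_lists_alt
  simp only []
  rw [← hmain]
  rfl
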